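-- pv_equiv track=rewrite | github.com/EuanMaxwell2001/breddit | helper_functions.py | salt_password
-- ===== SOURCE A (Python) =====
-- def salt_password(password):
--     #every 2 chars insert a "bingbong"
--     iterations = 0
--     password_array = []
--     for char in password:
--         iterations += 1
--         password_array.append(char)
--         if iterations % 2 ==0:
--             password_array.append('bingbong')
--
--     return ''.join(password_array)
-- ===== SOURCE B (Python) =====
-- def salt_password(password):
--     chunks = [password[i:i+2] for i in range(0, len(password), 2)]
--     out = 'bingbong'.join(chunks)
--     if password and len(password) % 2 == 0:
--         out += 'bingbong'
--     return out
-- ===== Notes on version B (the rewrite author's own statement) =====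
-- stated objective: alternative
-- what changed: Replaces the per-character counter loop that appends chars one by one into an array with a pair-slicing pass: split the password into 2-char chunks, join them with 'bingbong', and append a trailing 'bingbong' exactly for nonempty even-length input.
import Mathlib
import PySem

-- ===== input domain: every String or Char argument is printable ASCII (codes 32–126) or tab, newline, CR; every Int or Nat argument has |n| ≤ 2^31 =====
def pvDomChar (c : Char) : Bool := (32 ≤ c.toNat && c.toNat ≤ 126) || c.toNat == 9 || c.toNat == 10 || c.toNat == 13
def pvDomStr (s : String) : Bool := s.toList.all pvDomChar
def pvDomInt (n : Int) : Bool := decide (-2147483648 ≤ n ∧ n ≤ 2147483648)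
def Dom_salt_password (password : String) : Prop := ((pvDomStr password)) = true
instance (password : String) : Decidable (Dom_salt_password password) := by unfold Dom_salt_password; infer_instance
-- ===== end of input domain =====

-- B rewrites A's per-character counter loop as a pair-slicing pass joined with 'bingbong' (objective: alternative decomposition, same cost).

-- ===== PORT A =====
-- loop body: bump the counter, append the char, and 'bingbong' after every second one
def pvStepA (s : Int × List (List Char)) (char : Char) : Int × List (List Char) :=
  let iterations := s.1 + 1
  let arr := s.2 ++ [[char]]
  if PySem.Int.mod iterations 2 = 0 then (iterations, arr ++ ["bingbong".toList])
  else (iterations, arr)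

def salt_password (password : String) : String :=
  let r := password.toList.foldl pvStepA (0, ([] : List (List Char)))
  String.ofList (PySem.Chars.join [] r.2)

-- ===== PORT B =====
def salt_password_alt (password : String) : String :=
  let cs := password.toList
  let chunks := (PySem.List.pyRange 0 (PySem.Str.len password) 2).map
      (fun i => PySem.List.slice cs (some i) (some (i + 2)))
  let out := PySem.Chars.join ("bingbong".toList) chunks
  let out := if cs ≠ [] ∧ PySem.Int.mod (PySem.Str.len password) 2 = 0
             then out ++ "bingbong".toList else out
  String.ofList out

-- ===== PRECONDITION & SPEC =====
def Spec_salt_password (password : String) (out : String) : Prop := out = salt_password_alt password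
instance (password : String) (out : String) : Decidable (Spec_salt_password password out) := by unfold Spec_salt_password; infer_instance

-- ===== CLAIM (what is proved, stated in full; the proofs are below) =====
def Claim_equal_salt_password : Prop := ∀ (password : String), Dom_salt_password password → Spec_salt_password password (salt_password password)

-- ===== LEMMAS AND PROOFS =====

-- the intended result, two characters at a time
def pvSalt : List Char → List Char
  | [] => []
  | [a] => [a]
  | a :: b :: t => a :: b :: ("bingbong".toList ++ pvSalt t)

-- the chunk list A's loop builds
def pvBlocks : List Char → List (List Char)
  | [] => []
  | [a] => [[a]]
  | a :: b :: t => [a] :: [b] :: "bingbong".toList :: pvBlocks t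

-- the 2-char chunks B slices
def pvPairs : List Char → List (List Char)
  | [] => []
  | [a] => [[a]]
  | a :: b :: t => [a, b] :: pvPairs t

lemma pvStepA_odd (m : Int) (acc : List (List Char)) (a : Char) :
    pvStepA (2 * m, acc) a = (2 * m + 1, acc ++ [[a]]) := by
  have h : PySem.Int.mod (2 * m + 1) 2 = 1 := by
    rw [PySem.Int.mod_eq_emod_of_pos (by omega)]; omega
  simp [pvStepA]

lemma pvStepA_even (m : Int) (acc : List (List Char)) (b : Char) :
    pvStepA (2 * m + 1, acc) b = (2 * (m + 1), acc ++ [[b]] ++ ["bingbong".toList]) := by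
  have h : PySem.Int.mod (2 * m + 1 + 1) 2 = 0 := by
    rw [PySem.Int.mod_eq_emod_of_pos (by omega)]; omega
  simp [pvStepA]
  rw [if_pos (by omega : (2:Int) ∣ 2 * m + 1 + 1)]
  simp [Prod.ext_iff]
  omega

lemma pvA_loop (cs : List Char) : ∀ (m : Int) (acc : List (List Char)),
    (cs.foldl pvStepA (2 * m, acc)).2 = acc ++ pvBlocks cs := by
  induction cs using pvBlocks.induct with
  | case1 => intro m acc; simp [pvBlocks]
  | case2 a =>
      intro m acc
      simp [List.foldl, pvStepA_odd, pvBlocks]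
  | case3 a b t ih =>
      intro m acc
      rw [List.foldl_cons, List.foldl_cons, pvStepA_odd, pvStepA_even, ih (m + 1)]
      simp [pvBlocks]

lemma pvJoin_blocks (cs : List Char) :
    PySem.Chars.join [] (pvBlocks cs) = pvSalt cs := by
  induction cs using pvBlocks.induct with
  | case1 => simp [pvBlocks, pvSalt, PySem.Chars.join_nil]
  | case2 a => simp [pvBlocks, pvSalt, PySem.Chars.join_singleton]
  | case3 a b t ih =>
      cases t with
      | nil =>
          simp [pvBlocks, pvSalt, PySem.Chars.join_cons_cons, PySem.Chars.join_singleton]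
      | cons c t' =>
          have hne : pvBlocks (c :: t') ≠ [] := by
            cases t' <;> simp [pvBlocks]
          obtain ⟨q, rest, hq⟩ : ∃ q rest, pvBlocks (c :: t') = q :: rest := by
            cases h : pvBlocks (c :: t') with
            | nil => exact absurd h hne
            | cons q rest => exact ⟨q, rest, rfl⟩
          simp only [pvBlocks, pvSalt] at *
          rw [hq] at ih ⊢
          rw [PySem.Chars.join_cons_cons, PySem.Chars.join_cons_cons,
              PySem.Chars.join_cons_cons, ih]
          simp

lemma pvPairs_ne_nil {cs : List Char} (h : cs ≠ []) : pvPairs cs ≠ [] := by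
  match cs with
  | [a] => simp [pvPairs]
  | a :: b :: t => simp [pvPairs]

lemma pvChunks_eq (cs : List Char) :
    (PySem.List.pyRange 0 (cs.length : Int) 2).map
      (fun i => PySem.List.slice cs (some i) (some (i + 2))) = pvPairs cs := by
  induction cs using pvPairs.induct with
  | case1 => simp [pvPairs, PySem.List.pyRange_of_pos 0 0 (by omega : (0:Int) < 2)]
  | case2 a =>
      rw [PySem.List.pyRange_of_pos 0 _ (by omega : (0:Int) < 2)]
      norm_num
      simp [pvPairs, PySem.List.slice]
  | case3 a b t ih =>
      rw [PySem.List.pyRange_of_pos 0 _ (by omega : (0:Int) < 2)] at ih ⊢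
      have hlen2 : ((a :: b :: t).length : Int) = (t.length : Int) + 2 := by simp; omega
      rw [hlen2]
      have hcnt : (((t.length : Int) + 2 - 0 + 2 - 1) / 2).toNat
          = (((t.length : Int) - 0 + 2 - 1) / 2).toNat + 1 := by omega
      have ht : (0 : Int) < (t.length : Int) + 2 := by omega
      simp only [ht, if_true, hcnt, List.range_succ_eq_map, List.map_cons, List.map_map]
      rw [show pvPairs (a :: b :: t) = [a, b] :: pvPairs t from rfl]
      congr 1
      by_cases ht0 : (0 : Int) < (t.length : Int)
      · rw [List.map_map] at ih
        simp only [ht0, if_true] at ih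
        rw [← ih]
        apply List.map_congr_left
        intro k hk
        simp only [Function.comp]
        push_cast
        simp only [zero_add]
        rw [show ((2:Int) * ((k:Int) + 1)) = (((2 * k + 2 : Nat)) : Int) by push_cast; ring]
        rw [show ((((2 * k + 2 : Nat)) : Int) + 2) = (((2 * k + 4 : Nat)) : Int) by push_cast; ring]
        rw [show ((2:Int) * (k:Int)) = (((2 * k : Nat)) : Int) by push_cast; ring]
        rw [show ((((2 * k : Nat)) : Int) + 2) = (((2 * k + 2 : Nat)) : Int) by push_cast; ring]
        rw [PySem.List.slice_natCast, PySem.List.slice_natCast]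
        have hd : List.drop (2 * k + 2) (a :: b :: t) = List.drop (2 * k) t := by
          rw [show 2 * k + 2 = (2 * k) + 1 + 1 by ring]
          simp [List.drop_succ_cons]
        rw [hd]
        congr 1
        omega
      · have htz : t = [] := by
          cases t with
          | nil => rfl
          | cons c t' => simp at ht0
        subst htz
        simp [pvPairs]

lemma pvB_core (cs : List Char) :
    (if cs ≠ [] ∧ PySem.Int.mod (cs.length : Int) 2 = 0
     then PySem.Chars.join ("bingbong".toList) (pvPairs cs) ++ "bingbong".toList
     else PySem.Chars.join ("bingbong".toList) (pvPairs cs)) = pvSalt cs := by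
  induction cs using pvPairs.induct with
  | case1 => simp [pvPairs, pvSalt, PySem.Chars.join_nil]
  | case2 a =>
      simp [pvPairs, pvSalt, PySem.Chars.join_singleton]
  | case3 a b t ih =>
      have hpar : PySem.Int.mod (((a :: b :: t).length : Int)) 2
          = PySem.Int.mod ((t.length : Int)) 2 := by
        rw [PySem.Int.mod_eq_emod_of_pos (by omega), PySem.Int.mod_eq_emod_of_pos (by omega)]
        simp only [List.length_cons]
        push_cast
        omega
      cases t with
      | nil =>
          simp [pvPairs, pvSalt, PySem.Chars.join_singleton]
      | cons c t' =>
          have hne : pvPairs (c :: t') ≠ [] := pvPairs_ne_nil (by simp)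
          obtain ⟨q, rest, hq⟩ : ∃ q rest, pvPairs (c :: t') = q :: rest := by
            cases h : pvPairs (c :: t') with
            | nil => exact absurd h hne
            | cons q rest => exact ⟨q, rest, rfl⟩
          simp only [pvPairs, pvSalt, hq]
          rw [PySem.Chars.join_cons_cons]
          rw [hq] at ih
          by_cases hev : PySem.Int.mod (((c :: t').length : Int)) 2 = 0
          · have hev2 : PySem.Int.mod (((a :: b :: c :: t').length : Int)) 2 = 0 := by
              rw [hpar]; exact hev
            simp only [hev, hev2, ne_eq, reduceCtorEq, not_false_eq_true] at ih ⊢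
            rw [← ih]
            simp
          · have hev2 : ¬ PySem.Int.mod (((a :: b :: c :: t').length : Int)) 2 = 0 := by
              rw [hpar]; exact hev
            simp only [hev, hev2, ne_eq, reduceCtorEq, not_false_eq_true, if_false, and_false] at ih ⊢
            rw [ih]
            simp

-- ===== VERDICT (by name: the statement is the Claim_ definition above) =====
theorem salt_password_spec : Claim_equal_salt_password := by
  intro password _
  unfold Spec_salt_password salt_password salt_password_alt
  simp only []
  have hA := pvA_loop password.toList 0 []
  rw [show (2 : Int) * 0 = 0 by ring] at hA
  rw [hA, List.nil_append, pvJoin_blocks]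
  have hlen : PySem.Str.len password = (password.toList.length : Int) := by
    simp [PySem.Str.len_eq]
  rw [hlen, pvChunks_eq]
  rw [pvB_core]
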